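-- pv_equiv track=rewrite | github.com/VIBogdanov/demo-python | src/demo/puzzles.py | get_minmax_prod
-- ===== SOURCE A (Python) =====
-- from collections.abc import Generator, Iterable, Iterator
-- from typing import Literal, TypeAlias, TypeVar, cast
--
-- TIntNone: TypeAlias = int | None
--
-- def get_minmax_prod(iterable: Iterable[int]) -> tuple[TIntNone, TIntNone]:
--     """
--     Находит две пары множителей в массиве чисел, дабы получить минимально возможное
--     и максимально возможное произведение. Допускаются отрицательные значения и ноль.
--
--     Details: Попытка реализовать максимально обобщенный вариант без индексирования,
--     без сортировки, без вычисления размера данных и без изменения исходных данных.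
--     Используется только итератор.
--
--     Args:
--         iterable (Iterable[int]): Набор чисел.
--
--     Returns:
--         (tuple(int, int)): Пара минимального и максимального значений произведения.
--     """
--     result: tuple[TIntNone, TIntNone] = (None, None)
--     # Получаем итератор для однократного прохода по элементам данных.
--     # По производительности сравнимо с сортировкой, но при этом не модифицирует исходные данные.
--     it_elements: Iterator[int] = iter(iterable)
--
--     # Инициализируем первыми значениями исходных данных.
--     try:
--         min1 = max1 = next(it_elements)
--     except StopIteration:
--         return result  # Если список исходных данных пуст
--
--     try:
--         min2 = max2 = next(it_elements)
--     except StopIteration: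
--         return (min1, max1)  # Список исходных данных состоит из одного значения
--
--     # Важно изначально инициализировать min и max корректными относительными значениями
--     if min2 < min1:
--         min1, min2 = min2, min1
--
--     if max1 < max2:
--         max1, max2 = max2, max1
--
--     for elm in it_elements:
--         # Вычисляем первые два минимальные значения
--         if elm < min1:
--             min1, min2 = elm, min1
--         elif elm < min2:
--             min2 = elm
--         #  и последние два максимальные значения
--         if max1 < elm:
--             max1, max2 = elm, max1
--         elif max2 < elm:
--             max2 = elm
--     # Данные произведения потребуются далее. Для читабельности кода.
--     min_prod = min1 * min2
--     max_prod = max1 * max2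
--
--     match (min1 < 0, max1 < 0):
--         case (True, True):  # Все числа отрицательные
--             result = (max_prod, min_prod)
--         case (True, False):  # Часть чисел отрицательные
--             result = (min1 * max1, min_prod if (max_prod < min_prod) else max_prod)
--         case (False, False):  # Все числа неотрицательные (включая ноль)
--             result = (min_prod, max_prod)
--     return result
-- ===== SOURCE B (Python) =====
-- def get_minmax_prod(iterable):
--     nums = sorted(iterable)
--     if not nums:
--         return (None, None)
--     if len(nums) == 1:
--         return (nums[0], nums[0])
--     lo1, lo2 = nums[0], nums[1]
--     hi1, hi2 = nums[-1], nums[-2]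
--     candidates = (lo1 * lo2, hi1 * hi2, lo1 * hi1)
--     return (min(candidates), max(candidates))
-- ===== Notes on version B (the rewrite author's own statement) =====
-- stated objective: simpler
-- what changed: Replaces A's single-pass tracking of the two smallest and two largest elements plus a sign-based case match by sorting once and taking the min and max of the three candidate pairwise products: smallest*second-smallest, largest*second-largest, smallest*largest.
import Mathlib
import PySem

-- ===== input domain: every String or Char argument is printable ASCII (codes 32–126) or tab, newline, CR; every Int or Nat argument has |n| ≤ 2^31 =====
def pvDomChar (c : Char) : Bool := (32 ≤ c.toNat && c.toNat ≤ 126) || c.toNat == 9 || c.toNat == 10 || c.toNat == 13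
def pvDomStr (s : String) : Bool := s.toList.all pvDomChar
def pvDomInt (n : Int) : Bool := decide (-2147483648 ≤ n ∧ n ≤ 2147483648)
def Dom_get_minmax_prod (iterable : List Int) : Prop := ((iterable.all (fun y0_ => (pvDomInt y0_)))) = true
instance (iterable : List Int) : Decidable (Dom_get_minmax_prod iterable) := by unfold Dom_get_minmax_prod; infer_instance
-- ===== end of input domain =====

-- B replaces A's one-pass two-smallest/two-largest tracking + sign match by sort-then-three-candidates; same values everywhere.

-- ===== PORT A =====
-- the body of A's `for elm in it_elements` loop
def pvStepA (st : Int × Int × Int × Int) (elm : Int) : Int × Int × Int × Int :=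
  match st with
  | (min1, min2, max1, max2) =>
    let (min1', min2') := if elm < min1 then (elm, min1) else if elm < min2 then (min1, elm) else (min1, min2)
    let (max1', max2') := if max1 < elm then (elm, max1) else if max2 < elm then (max1, elm) else (max1, max2)
    (min1', min2', max1', max2')

-- the post-loop product computation and sign dispatch of A (its `match` statement)
def pvFinish (st : Int × Int × Int × Int) : Option Int × Option Int :=
  match st with
  | (m1, m2, M1, M2) =>
    let min_prod := m1 * m2
    let max_prod := M1 * M2
    match (decide (m1 < 0), decide (M1 < 0)) with
    | (true, true) => (some max_prod, some min_prod)
    | (true, false) => (some (m1 * M1), some (if max_prod < min_prod then min_prod else max_prod))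
    | (false, false) => (some min_prod, some max_prod)
    | (false, true) => (none, none)                      -- unreachable in Python too: result stays (None, None)

def get_minmax_prod (iterable : List Int) : Option Int × Option Int :=
  match iterable with
  | [] => (none, none)                                   -- StopIteration on the first next()
  | x :: rest0 =>
    match rest0 with
    | [] => (some x, some x)                             -- StopIteration on the second next()
    | y :: rest =>
      let (min1, min2) := if y < x then (y, x) else (x, y)
      let (max1, max2) := if x < y then (y, x) else (x, y)
      pvFinish (rest.foldl pvStepA (min1, min2, max1, max2))

-- ===== PORT B =====
def get_minmax_prod_alt (iterable : List Int) : Option Int × Option Int :=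
  let nums := PySem.List.sorted iterable (fun x => x) false
  match nums with
  | [] => (none, none)
  | [x] => (some x, some x)
  | lo1 :: lo2 :: _ =>
    -- nums[-1], nums[-2]: both in range since len(nums) ≥ 2, so the fallback is unreachable
    match PySem.List.pyGet? nums (-1), PySem.List.pyGet? nums (-2) with
    | some hi1, some hi2 =>
      let p1 := lo1 * lo2
      let p2 := hi1 * hi2
      let p3 := lo1 * hi1
      (some (min p1 (min p2 p3)), some (max p1 (max p2 p3)))
    | _, _ => (none, none)

-- ===== PRECONDITION & SPEC =====
def Spec_get_minmax_prod (iterable : List Int) (out : Option Int × Option Int) : Prop := out = get_minmax_prod_alt iterable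
instance (iterable : List Int) (out : Option Int × Option Int) : Decidable (Spec_get_minmax_prod iterable out) := by unfold Spec_get_minmax_prod; infer_instance

-- ===== CLAIM (what is proved, stated in full; the proofs are below) =====
def Claim_equal_get_minmax_prod : Prop := ∀ (iterable : List Int), Dom_get_minmax_prod iterable → Spec_get_minmax_prod iterable (get_minmax_prod iterable)

-- ===== LEMMAS AND PROOFS =====

-- Invariant of A's loop: the tracked quadruple (m1, m2, M1, M2) names the first two and
-- the last two entries of a sorted arrangement of the elements consumed so far.
def pvInv (S : List Int) (st : Int × Int × Int × Int) : Prop :=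
  ∃ l : List Int, l.Perm S ∧ l.Pairwise (· ≤ ·) ∧
    (∃ t, l = st.1 :: st.2.1 :: t) ∧ (∃ u, l = u ++ [st.2.2.2, st.2.2.1])

lemma pvInv_perm {S S' : List Int} {st} (hp : S.Perm S') (h : pvInv S st) : pvInv S' st := by
  obtain ⟨l, h1, h2, h3, h4⟩ := h
  exact ⟨l, h1.trans hp, h2, h3, h4⟩

-- inserting e into a sorted list headed by m1 ≤ m2 updates the first two entries exactly
-- the way A's loop body updates (min1, min2)
lemma pvHead2_orderedInsert (e m1 m2 : Int) (t : List Int) (h12 : m1 ≤ m2) :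
    ∃ t', List.orderedInsert (· ≤ ·) e (m1 :: m2 :: t) =
      (if e < m1 then e else m1) ::
      (if e < m1 then m1 else if e < m2 then e else m2) :: t' := by
  rcases le_or_gt e m1 with h1 | h1
  · refine ⟨m2 :: t, ?_⟩
    have : List.orderedInsert (· ≤ ·) e (m1 :: m2 :: t) = e :: m1 :: m2 :: t := by
      simp [List.orderedInsert, h1]
    rw [this]
    simp only [List.cons.injEq]
    and_intros <;> first | trivial | (split_ifs <;> omega)
  · rcases le_or_gt e m2 with h2 | h2
    · refine ⟨m2 :: t, ?_⟩
      have : List.orderedInsert (· ≤ ·) e (m1 :: m2 :: t) = m1 :: e :: m2 :: t := by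
        simp [List.orderedInsert, h2, show ¬ e ≤ m1 by omega]
      rw [this]
      simp only [List.cons.injEq]
      and_intros <;> first | trivial | (split_ifs <;> omega)
    · refine ⟨List.orderedInsert (· ≤ ·) e t, ?_⟩
      have : List.orderedInsert (· ≤ ·) e (m1 :: m2 :: t) =
          m1 :: m2 :: List.orderedInsert (· ≤ ·) e t := by
        simp [List.orderedInsert, show ¬ e ≤ m1 by omega, show ¬ e ≤ m2 by omega]
      rw [this]
      simp only [List.cons.injEq]
      and_intros <;> first | trivial | (split_ifs <;> omega)

-- inserting e into a sorted list ending in [M2, M1] updates the last two entries exactly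
-- the way A's loop body updates (max1, max2)
lemma pvLast2_orderedInsert (e M2 M1 : Int) :
    ∀ (u : List Int), (u ++ [M2, M1]).Pairwise (· ≤ ·) →
    ∃ u', List.orderedInsert (· ≤ ·) e (u ++ [M2, M1]) =
      u' ++ [(if M1 < e then M1 else if M2 < e then e else M2),
             (if M1 < e then e else M1)] := by
  intro u
  induction u with
  | nil =>
    intro hs
    have hM : M2 ≤ M1 := by
      simp [List.pairwise_cons] at hs; omega
    rcases le_or_gt e M2 with h1 | h1
    · refine ⟨[e], ?_⟩
      have : List.orderedInsert (· ≤ ·) e ([] ++ [M2, M1]) = [e, M2, M1] := by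
        simp [List.orderedInsert, h1]
      rw [this]
      simp only [List.cons_append, List.nil_append, List.cons.injEq]
      and_intros <;> first | trivial | (split_ifs <;> omega)
    · rcases le_or_gt e M1 with h2 | h2
      · refine ⟨[M2], ?_⟩
        have : List.orderedInsert (· ≤ ·) e ([] ++ [M2, M1]) = [M2, e, M1] := by
          simp [List.orderedInsert, h2, show ¬ e ≤ M2 by omega]
        rw [this]
        simp only [List.cons_append, List.nil_append, List.cons.injEq]
        and_intros <;> first | trivial | (split_ifs <;> omega)
      · refine ⟨[M2], ?_⟩
        have : List.orderedInsert (· ≤ ·) e ([] ++ [M2, M1]) = [M2, M1, e] := by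
          simp [List.orderedInsert, show ¬ e ≤ M2 by omega, show ¬ e ≤ M1 by omega]
        rw [this]
        simp only [List.cons_append, List.nil_append, List.cons.injEq]
        and_intros <;> first | trivial | (split_ifs <;> omega)
  | cons a u ih =>
    intro hs
    have hs' : (u ++ [M2, M1]).Pairwise (· ≤ ·) := hs.of_cons
    have ha : ∀ b ∈ u ++ [M2, M1], a ≤ b := (List.pairwise_cons.mp hs).1
    rcases le_or_gt e a with h | h
    · -- e goes in front; the last two entries are untouched
      have haM1 : a ≤ M1 := ha M1 (by simp)
      have haM2 : a ≤ M2 := ha M2 (by simp)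
      refine ⟨e :: a :: u, ?_⟩
      have : List.orderedInsert (· ≤ ·) e ((a :: u) ++ [M2, M1]) =
          e :: a :: (u ++ [M2, M1]) := by
        simp [List.orderedInsert, h]
      rw [this]
      have e1 : (if M1 < e then M1 else if M2 < e then e else M2) = M2 := by
        split_ifs <;> omega
      have e2 : (if M1 < e then e else M1) = M1 := by
        split_ifs <;> omega
      simp [e1, e2]
    · obtain ⟨u', hu'⟩ := ih hs'
      refine ⟨a :: u', ?_⟩
      have : List.orderedInsert (· ≤ ·) e ((a :: u) ++ [M2, M1]) =
          a :: List.orderedInsert (· ≤ ·) e (u ++ [M2, M1]) := by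
        simp [List.orderedInsert, show ¬ e ≤ a by omega]
      rw [this, hu']
      simp

lemma pvStepA_inv {S : List Int} {st} (e : Int) (h : pvInv S st) :
    pvInv (e :: S) (pvStepA st e) := by
  obtain ⟨m1, m2, M1, M2⟩ := st
  obtain ⟨l, hperm, hsort, ⟨t, ht⟩, ⟨u, hu⟩⟩ := h
  refine ⟨List.orderedInsert (· ≤ ·) e l, ?_, ?_, ?_, ?_⟩
  · exact (List.perm_orderedInsert _ e l).trans (hperm.cons e)
  · exact List.Pairwise.orderedInsert e l hsort
  · -- head shape
    subst ht
    obtain ⟨t', ht'⟩ := pvHead2_orderedInsert e m1 m2 t ((List.pairwise_cons.mp hsort).1 m2 (by simp))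
    refine ⟨t', ?_⟩
    rw [ht']
    simp only [pvStepA]
    by_cases h1 : e < m1
    · simp [h1]
    · by_cases h2 : e < m2 <;> simp [h1, h2]
  · -- tail shape
    rw [hu]
    obtain ⟨u', hu'⟩ := pvLast2_orderedInsert e M2 M1 u (hu ▸ hsort)
    refine ⟨u', ?_⟩
    rw [hu']
    simp only [pvStepA]
    by_cases h3 : M1 < e <;> by_cases h4 : M2 < e <;>
      by_cases h1 : e < m1 <;> by_cases h2 : e < m2 <;> simp [h1, h2, h3, h4]

lemma pvFold_inv : ∀ (rest S : List Int) (st : Int × Int × Int × Int),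
    pvInv S st → pvInv (S ++ rest) (rest.foldl pvStepA st) := by
  intro rest
  induction rest with
  | nil => intro S st h; simpa using h
  | cons e rest ih =>
    intro S st h
    have h2 := ih (e :: S) (pvStepA st e) (pvStepA_inv e h)
    exact pvInv_perm (by exact List.perm_middle.symm) h2

lemma pvGetNeg_append (u : List Int) (a b : Int) :
    PySem.List.pyGet? (u ++ [a, b]) (-1) = some b ∧
    PySem.List.pyGet? (u ++ [a, b]) (-2) = some a := by
  constructor
  · rw [PySem.List.pyGet?_neg_one]
    simp [List.getLast?_append]
  · rw [PySem.List.pyGet?_neg_ofNat (u ++ [a, b]) 2 (by omega) (by simp)]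
    have h2 : (u ++ [a, b]).length - 2 = u.length := by simp
    rw [h2]
    rw [List.getElem?_append_right (by omega)]
    simp

-- the whole work after the first two elements have initialised the tracker
lemma pvMain (x y : Int) (rest : List Int) (min1 min2 max1 max2 : Int)
    (hinit : pvInv [x, y] (min1, min2, max1, max2)) :
    pvFinish (rest.foldl pvStepA (min1, min2, max1, max2)) =
      get_minmax_prod_alt (x :: y :: rest) := by
  have hinv := pvFold_inv rest [x, y] _ hinit
  rcases hfold : rest.foldl pvStepA (min1, min2, max1, max2) with ⟨m1, m2, M1, M2⟩
  rw [hfold] at hinv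
  obtain ⟨l, hperm, hsort, ⟨t, ht⟩, ⟨u, hu⟩⟩ := hinv
  simp only at ht hu
  -- order facts
  have hm12 : m1 ≤ m2 := by
    rw [ht] at hsort
    exact (List.pairwise_cons.mp hsort).1 m2 (by simp)
  have hM21 : M2 ≤ M1 := by
    rw [hu] at hsort
    have := (List.pairwise_append.mp hsort).2.1
    simp [List.pairwise_cons] at this; omega
  have hmem_M2 : M2 ∈ l := by rw [hu]; simp
  have hm1M2 : m1 ≤ M2 := by
    rw [ht] at hsort hmem_M2
    rcases List.mem_cons.mp hmem_M2 with h | h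
    · omega
    · exact (List.pairwise_cons.mp hsort).1 M2 h
  have hmem_m2 : m2 ∈ l := by rw [ht]; simp
  have hm2M1 : m2 ≤ M1 := by
    rw [hu] at hsort hmem_m2
    rcases List.mem_append.mp hmem_m2 with h | h
    · exact (List.pairwise_append.mp hsort).2.2 m2 h M1 (by simp)
    · simp at h
      rcases h with h | h <;> omega
  -- B evaluates on the sorted arrangement l
  have hsorted_eq : PySem.List.sorted (x :: y :: rest) (fun x => x) false = l := by
    refine PySem.List.sorted_id_eq_of_perm_of_pairwise _ _ (hperm.trans ?_) hsort
    simp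
  have hB : get_minmax_prod_alt (x :: y :: rest) =
      (some (min (m1 * m2) (min (M1 * M2) (m1 * M1))),
       some (max (m1 * m2) (max (M1 * M2) (m1 * M1)))) := by
    unfold get_minmax_prod_alt
    simp only [hsorted_eq]
    obtain ⟨hg1, hg2⟩ := pvGetNeg_append u M2 M1
    rw [ht, ← ht, hu, hg1, hg2, ← hu, ht]
  rw [hB]
  simp only [pvFinish]
  by_cases hm : m1 < 0 <;> by_cases hM : M1 < 0
  · -- all elements negative
    simp only [hm, hM, decide_true]
    have h23 : M1 * M2 ≤ m1 * M1 := by nlinarith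
    have h31 : m1 * M1 ≤ m1 * m2 := by nlinarith
    simp only [Prod.mk.injEq, Option.some.injEq]
    constructor <;> omega
  · -- mixed signs
    simp only [hm, hM, decide_true, decide_false]
    have h31 : m1 * M1 ≤ m1 * m2 := by nlinarith
    have h32 : m1 * M1 ≤ M1 * M2 := by nlinarith
    simp only [Prod.mk.injEq, Option.some.injEq]
    constructor <;> omega
  · -- impossible: the minimum is nonnegative but the maximum is negative
    omega
  · -- all elements nonnegative
    simp only [hm, hM, decide_false]
    have h13 : m1 * m2 ≤ m1 * M1 := by nlinarith
    have h32 : m1 * M1 ≤ M1 * M2 := by nlinarith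
    simp only [Prod.mk.injEq, Option.some.injEq]
    constructor <;> omega

-- ===== VERDICT (by name: the statement is the Claim_ definition above) =====
theorem get_minmax_prod_spec : Claim_equal_get_minmax_prod := by
  intro iterable _
  unfold Spec_get_minmax_prod
  match iterable with
  | [] => rfl
  | [x] =>
    show _ = get_minmax_prod_alt [x]
    unfold get_minmax_prod_alt
    rw [PySem.List.sorted_eq_self_of_pairwise [x] (fun x => x) (by simp)]
    rfl
  | x :: y :: rest =>
    show get_minmax_prod (x :: y :: rest) = get_minmax_prod_alt (x :: y :: rest)
    by_cases hyx : y < x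
    · have h1 : ¬ x < y := by omega
      have hA : get_minmax_prod (x :: y :: rest) =
          pvFinish (rest.foldl pvStepA (y, x, x, y)) := by
        simp [get_minmax_prod, hyx, h1]
      rw [hA]
      refine pvMain x y rest y x x y ⟨[y, x], List.Perm.swap x y [], ?_, ⟨[], rfl⟩, ⟨[], rfl⟩⟩
      simp [List.pairwise_cons]; omega
    · by_cases hxy : x < y
      · have hA : get_minmax_prod (x :: y :: rest) =
            pvFinish (rest.foldl pvStepA (x, y, y, x)) := by
          simp [get_minmax_prod, hyx, hxy]
        rw [hA]
        refine pvMain x y rest x y y x ⟨[x, y], List.Perm.refl _, ?_, ⟨[], rfl⟩, ⟨[], rfl⟩⟩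
        simp [List.pairwise_cons]; omega
      · have hxy' : x = y := by omega
        have hA : get_minmax_prod (x :: y :: rest) =
            pvFinish (rest.foldl pvStepA (x, y, x, y)) := by
          simp [get_minmax_prod, hyx, hxy]
        rw [hA]
        refine pvMain x y rest x y x y ⟨[x, y], List.Perm.refl _, ?_, ⟨[], rfl⟩, ⟨[], ?_⟩⟩
        · simp [List.pairwise_cons]; omega
        · simp [hxy']
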